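-- pv_equiv track=rewrite | github.com/penguinwu/oss-model-graph-break-corpus | tools/verify_repro.py | _parse_model_mode
-- ===== SOURCE A (Python) =====
-- def _parse_model_mode(original_command: str) -> tuple[str | None, str | None]:
--     """Conservative extract of --models / --modes from the command."""
--     parts = original_command.split()
--     model = mode = None
--     for i, p in enumerate(parts):
--         if p == "--models" and i + 1 < len(parts):
--             model = parts[i + 1]
--         if p == "--modes" and i + 1 < len(parts):
--             mode = parts[i + 1]
--     return model, mode
-- ===== SOURCE B (Python) =====
-- def _parse_model_mode(original_command: str) -> tuple[str | None, str | None]: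
--     """Conservative extract of --models / --modes from the command."""
--     parts = original_command.split()
--     mapping = dict(zip(parts, parts[1:]))
--     return mapping.get("--models"), mapping.get("--modes")
-- ===== Notes on version B (the rewrite author's own statement) =====
-- stated objective: idiomatic
-- what changed: Replaces the indexed enumerate scan with per-token guard-and-branch by building a full successor map dict(zip(parts, parts[1:])) once and answering with two dictionary lookups; dict's last-wins overwrite matches the loop's overwrite and the final token never becomes a key, matching the i+1 < len guard.
import Mathlib
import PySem

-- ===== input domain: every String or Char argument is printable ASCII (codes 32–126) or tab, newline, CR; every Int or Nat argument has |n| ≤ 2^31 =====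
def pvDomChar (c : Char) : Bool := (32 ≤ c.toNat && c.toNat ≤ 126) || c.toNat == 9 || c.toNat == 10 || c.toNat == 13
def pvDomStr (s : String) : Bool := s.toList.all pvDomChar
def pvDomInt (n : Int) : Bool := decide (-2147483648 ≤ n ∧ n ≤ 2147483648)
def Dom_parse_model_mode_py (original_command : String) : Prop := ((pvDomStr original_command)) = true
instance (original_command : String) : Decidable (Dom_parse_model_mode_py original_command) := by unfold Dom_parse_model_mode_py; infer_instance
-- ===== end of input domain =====

-- B replaces A's indexed scan-and-branch with building a successor map dict(zip(parts, parts[1:])) and two lookups (idiomatic; same cost).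


-- ===== PORT A =====
-- literal transliteration of A: split, then an indexed loop over enumerate(parts)
-- updating model/mode from parts[i+1] under the i+1 < len(parts) guard.
def parse_model_mode_py (original_command : String) : Option String × Option String :=
  let parts := PySem.Str.split₀ original_command
  (PySem.List.enumerate parts 0).foldl
    (fun st ip =>
      let st1 := if ip.2 = "--models" ∧ ip.1 + 1 < (parts.length : Int)
                 then (PySem.List.pyGet? parts (ip.1 + 1), st.2) else st
      if ip.2 = "--modes" ∧ ip.1 + 1 < (parts.length : Int)
      then (st1.1, PySem.List.pyGet? parts (ip.1 + 1)) else st1)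
    (none, none)

-- ===== PORT B =====
-- literal transliteration of B: mapping = dict(zip(parts, parts[1:])); two lookups.
def parse_model_mode_py_alt (original_command : String) : Option String × Option String :=
  let parts := PySem.Str.split₀ original_command
  let mapping := PySem.Dict.ofList (parts.zip parts.tail)
  (mapping.get? "--models", mapping.get? "--modes")

-- ===== PRECONDITION & SPEC =====
def Spec_parse_model_mode_py (original_command : String) (out : Option String × Option String) : Prop := out = parse_model_mode_py_alt original_command
instance (original_command : String) (out : Option String × Option String) : Decidable (Spec_parse_model_mode_py original_command out) := by unfold Spec_parse_model_mode_py; infer_instance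

-- ===== CLAIM (what is proved, stated in full; the proofs are below) =====
def Claim_equal_parse_model_mode_py : Prop := ∀ (original_command : String), Dom_parse_model_mode_py original_command → Spec_parse_model_mode_py original_command (parse_model_mode_py original_command)

-- ===== LEMMAS AND PROOFS =====

-- Looking a key up in dict(pairs) returns the value of the LAST pair with that key.
theorem get?_ofList_eq_foldl (ps : List (String × String)) (k : String) :
    (PySem.Dict.ofList ps).get? k
      = ps.foldl (fun acc p => if p.1 = k then some p.2 else acc) (none : Option String) := by
  show ((ps.foldl (fun d p => d.insert p.1 p.2) PySem.Dict.empty).get? k) = _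
  have h : ∀ (ps : List (String × String)) (d : PySem.Dict String String),
      (ps.foldl (fun d p => d.insert p.1 p.2) d).get? k
        = ps.foldl (fun acc p => if p.1 = k then some p.2 else acc) (d.get? k) := by
    intro ps
    induction ps with
    | nil => intro d; rfl
    | cons p t ih =>
      intro d
      simp only [List.foldl_cons, ih]
      congr 1
      rw [PySem.Dict.get?_insert]
      by_cases hk : p.1 = k
      · simp [hk]
      · simp [hk, Ne.symm hk]
  simpa using h ps PySem.Dict.empty

-- A pair-state fold over the adjacent pairs splits into the two independent last-match folds.
theorem fold_pairs_split (ps : List (String × String)) (s : Option String × Option String) :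
    ps.foldl
      (fun st p =>
        let st1 := if p.1 = "--models" then (some p.2, st.2) else st
        if p.1 = "--modes" then (st1.1, some p.2) else st1) s
    = (ps.foldl (fun acc p => if p.1 = "--models" then some p.2 else acc) s.1,
       ps.foldl (fun acc p => if p.1 = "--modes" then some p.2 else acc) s.2) := by
  induction ps generalizing s with
  | nil => rfl
  | cons p t ih =>
    simp only [List.foldl_cons, ih]
    split_ifs with h1 h2 h2 <;> simp_all

-- A's enumerate loop, started at offset j on the suffix parts.drop j, is the adjacent-pairs fold.
theorem enum_fold_eq_zip_fold (parts : List String) :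
    ∀ (rest : List String) (j : Nat) (s : Option String × Option String),
      rest = parts.drop j →
      (PySem.List.enumerate rest (j : Int)).foldl
        (fun st ip =>
          let st1 := if ip.2 = "--models" ∧ ip.1 + 1 < (parts.length : Int)
                     then (PySem.List.pyGet? parts (ip.1 + 1), st.2) else st
          if ip.2 = "--modes" ∧ ip.1 + 1 < (parts.length : Int)
          then (st1.1, PySem.List.pyGet? parts (ip.1 + 1)) else st1) s
      = (rest.zip rest.tail).foldl
        (fun st p =>
          let st1 := if p.1 = "--models" then (some p.2, st.2) else st
          if p.1 = "--modes" then (st1.1, some p.2) else st1) s := by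
  intro rest
  induction rest with
  | nil => intro j s _; rfl
  | cons a t ih =>
    intro j s hdrop
    have hdrop' : t = parts.drop (j + 1) := by
      have := congrArg List.tail hdrop
      simpa [List.tail_drop] using this
    have hlen : parts.length = j + 1 + t.length := by
      have h1 : (parts.drop j).length = parts.length - j := List.length_drop
      have hj : j ≤ parts.length := by
        by_contra hj
        have : parts.drop j = [] := List.drop_eq_nil_of_le (by omega)
        simp [this] at hdrop
      rw [← hdrop] at h1
      simp at h1; omega
    have hget : PySem.List.pyGet? parts ((j : Int) + 1) = t.head? := by
      have : ((j : Int) + 1) = ((j + 1 : Nat) : Int) := by push_cast; ring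
      rw [this, PySem.List.pyGet?_natCast]
      rw [List.head?_eq_getElem?, hdrop', List.getElem?_drop]
    rw [PySem.List.enumerate_cons, List.foldl_cons]
    cases t with
    | nil =>
      have hc : ¬ ((j : Int) + 1 < (parts.length : Int)) := by
        simp only [List.length_nil, add_zero] at hlen
        rw [hlen]; push_cast; omega
      simp only [hc, and_false, if_false]
      rfl
    | cons b t' =>
      have hc : (((j : Int) + 1 < (parts.length : Int)) = True) := by
        simp only [eq_iff_iff, iff_true]
        simp only [List.length_cons] at hlen
        rw [hlen]; push_cast; omega
      have hj1 : ((j : Int) + 1) = (((j + 1 : Nat)) : Int) := by push_cast; ring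
      simp only [hc, and_true, hget, List.head?]
      rw [hj1, ih (j + 1) _ hdrop']
      rfl

-- ===== VERDICT (by name: the statement is the Claim_ definition above) =====
theorem parse_model_mode_py_spec : Claim_equal_parse_model_mode_py := by
  intro oc _
  show parse_model_mode_py oc = parse_model_mode_py_alt oc
  unfold parse_model_mode_py parse_model_mode_py_alt
  have h := enum_fold_eq_zip_fold (PySem.Str.split₀ oc) (PySem.Str.split₀ oc) 0 (none, none) (by simp)
  rw [Nat.cast_zero] at h
  simp only [h, fold_pairs_split, get?_ofList_eq_foldl]
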